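-- pv_equiv track=rewrite | github.com/Shirhussain/Algorithm_by_shir | Dynamic_programming/number_factor_topDown_and_bottomUp.py | number_factor_topDown
-- ===== SOURCE A (Python) =====
-- def number_factor_topDown(n, temp_dict):
--     if n in (0, 1, 2):
--         return 1
--     elif n == 3:
--         return 2
--     else:
--         if n not in temp_dict:
--             subP1 = number_factor_topDown(n-1, temp_dict)
--             subP2 = number_factor_topDown(n-3, temp_dict)
--             subP3 = number_factor_topDown(n-4, temp_dict)
--             temp_dict[n] = subP1 + subP2 + subP3
--         return temp_dict[n]
-- ===== SOURCE B (Python) =====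
-- def number_factor_topDown(n, temp_dict):
--     # Bottom-up DP that uses temp_dict itself as the DP table.
--     base = (1, 1, 1, 2)
--     if 0 <= n <= 3:
--         return base[n]
--     value = lambda k: base[k] if k <= 3 else temp_dict[k]
--     for i in range(4, n + 1):
--         if i not in temp_dict:
--             temp_dict[i] = value(i - 1) + value(i - 3) + value(i - 4)
--     return temp_dict[n]
-- ===== Notes on version B (the rewrite author's own statement) =====
-- stated objective: alternative
-- what changed: Replaces A's memoized top-down recursion with an iterative bottom-up DP loop that uses temp_dict itself as the DP table; Pre_ excludes inputs where A raises RecursionError (n < 0 with n not a key of temp_dict); equivalence is about the return value (B may cache more entries than A when n is already cached).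
import Mathlib
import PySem

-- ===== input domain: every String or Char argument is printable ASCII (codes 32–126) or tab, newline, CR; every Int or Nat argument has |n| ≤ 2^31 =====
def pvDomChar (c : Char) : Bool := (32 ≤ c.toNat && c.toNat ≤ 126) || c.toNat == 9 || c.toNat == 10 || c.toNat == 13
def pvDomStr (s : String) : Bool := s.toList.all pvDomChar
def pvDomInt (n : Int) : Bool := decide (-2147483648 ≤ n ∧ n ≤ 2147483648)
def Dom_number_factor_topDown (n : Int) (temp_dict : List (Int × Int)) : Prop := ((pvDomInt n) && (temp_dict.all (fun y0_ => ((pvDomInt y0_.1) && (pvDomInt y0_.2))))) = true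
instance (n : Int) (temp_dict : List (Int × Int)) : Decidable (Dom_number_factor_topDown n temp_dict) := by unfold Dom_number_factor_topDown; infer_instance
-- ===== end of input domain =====

-- B replaces A's memoized top-down recursion with an iterative bottom-up loop using the
-- dict itself as the DP table; equivalence is about the RETURN value (both mutate
-- temp_dict, B may cache more entries than A when n is already a key).

-- ===== PORT A =====
-- memoized recursion; the dict is threaded as state; fuel only makes the recursion
-- total in Lean (unreachable under Pre_: each call decreases n by ≥ 1 towards the base cases)
def nfA : Nat → Int → PySem.Dict Int Int → Int × PySem.Dict Int Int
  | fuel, n, d =>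
    if n = 0 ∨ n = 1 ∨ n = 2 then (1, d)
    else if n = 3 then (2, d)
    else
      match fuel with
      | 0 => (0, d)
      | fuel' + 1 =>
        if d.contains n = false then
          let r1 := nfA fuel' (n - 1) d
          let r2 := nfA fuel' (n - 3) r1.2
          let r3 := nfA fuel' (n - 4) r2.2
          let d' := r3.2.insert n (r1.1 + r2.1 + r3.1)
          (d'.getD n 0, d')
        else (d.getD n 0, d)

def number_factor_topDown (n : Int) (temp_dict : List (Int × Int)) : Int :=
  (nfA (n.toNat + 1) n (PySem.Dict.ofList temp_dict)).1

-- ===== PORT B =====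
-- value(k) = base[k] if k <= 3 else temp_dict[k]; within B's loop k is always ≥ 0,
-- so the base-tuple lookup is exactly this conditional; temp_dict[k] is always a hit
-- there (the loop fills keys in order), ported as getD _ 0.
def nfGet (d : PySem.Dict Int Int) (k : Int) : Int :=
  if k ≤ 3 then (if k = 3 then 2 else 1) else d.getD k 0

-- the loop body: if i not in temp_dict: temp_dict[i] = value(i-1)+value(i-3)+value(i-4)
def nfStep (d : PySem.Dict Int Int) (i : Int) : PySem.Dict Int Int :=
  if d.contains i then d
  else d.insert i (nfGet d (i - 1) + nfGet d (i - 3) + nfGet d (i - 4))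

-- final temp_dict[n] raises KeyError only outside Pre_; ported as getD n 0
def number_factor_topDown_alt (n : Int) (temp_dict : List (Int × Int)) : Int :=
  if 0 ≤ n ∧ n ≤ 3 then (if n = 3 then 2 else 1)
  else
    ((PySem.List.pyRange 4 (n + 1) 1).foldl nfStep (PySem.Dict.ofList temp_dict)).getD n 0

-- ===== PRECONDITION & SPEC =====
-- A raises RecursionError when n < 0 and n is not a key of temp_dict (the recursion never
-- reaches a base case); exactly those inputs are excluded (B raises KeyError there too).
def Pre_number_factor_topDown (n : Int) (temp_dict : List (Int × Int)) : Prop :=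
  0 ≤ n ∨ (PySem.Dict.ofList temp_dict).contains n = true
instance (n : Int) (temp_dict : List (Int × Int)) : Decidable (Pre_number_factor_topDown n temp_dict) := by unfold Pre_number_factor_topDown; infer_instance

def pvWitness_number_factor_topDown : Int × (List (Int × Int)) := (6, [(5, 7)])

def Spec_number_factor_topDown (n : Int) (temp_dict : List (Int × Int)) (out : Int) : Prop := out = number_factor_topDown_alt n temp_dict
instance (n : Int) (temp_dict : List (Int × Int)) (out : Int) : Decidable (Spec_number_factor_topDown n temp_dict out) := by unfold Spec_number_factor_topDown; infer_instance

-- ===== CLAIM (what is proved, stated in full; the proofs are below) =====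
def Claim_equal_number_factor_topDown : Prop := ∀ (n : Int) (temp_dict : List (Int × Int)), Dom_number_factor_topDown n temp_dict → Pre_number_factor_topDown n temp_dict → Spec_number_factor_topDown n temp_dict (number_factor_topDown n temp_dict)

-- ===== LEMMAS AND PROOFS =====

-- the pure value both programs compute: cached entries win for k ≥ 4, base cases below
def pf (d : PySem.Dict Int Int) : Nat → Int
  | 0 => 1
  | 1 => 1
  | 2 => 1
  | 3 => 2
  | (k + 4) =>
      match d.get? ((k : Int) + 4) with
      | some v => v
      | none => pf d (k + 3) + pf d (k + 1) + pf d k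

-- invariant: d' extends d only by keys k ≥ 4 carrying the value pf d k
def PExt (d d' : PySem.Dict Int Int) : Prop :=
  (∀ k v, d.get? k = some v → d'.get? k = some v) ∧
  (∀ k v, d'.get? k = some v → d.get? k = some v ∨ (4 ≤ k ∧ v = pf d k.toNat))

theorem pext_refl (d : PySem.Dict Int Int) : PExt d d :=
  ⟨fun _ _ h => h, fun _ _ h => Or.inl h⟩

theorem nfA_main (fuel : Nat) : ∀ (m : Nat) (d d' : PySem.Dict Int Int),
    PExt d d' → m ≤ fuel + 3 →
    (nfA fuel (m : Int) d').1 = pf d m ∧ PExt d (nfA fuel (m : Int) d').2 := by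
  induction fuel with
  | zero =>
    intro m d d' hE hm
    interval_cases m <;> simp [nfA, pf] <;> exact hE
  | succ fuel ih =>
    intro m d d' hE hm
    match m with
    | 0 => simpa [nfA, pf] using hE
    | 1 => simpa [nfA, pf] using hE
    | 2 => simpa [nfA, pf] using hE
    | 3 => simpa [nfA, pf] using hE
    | (k + 4) =>
      have hne0 : ¬((((k : Int) + 4) = 0 ∨ ((k : Int) + 4) = 1 ∨ ((k : Int) + 4) = 2)) := by omega
      have hne3 : ¬(((k : Int) + 4) = 3) := by omega
      rw [show ((k + 4 : Nat) : Int) = (k : Int) + 4 by push_cast; ring]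
      rw [nfA]
      simp only [hne0, hne3, if_false]
      rcases hcb : d'.contains ((k : Int) + 4) with _ | _
      · have hc : d'.contains ((k : Int) + 4) = false := hcb -- uncached: recurse
        have hnone' : d'.get? ((k : Int) + 4) = none := by
          rcases h : d'.get? ((k : Int) + 4) with _ | v
          · rfl
          · exfalso
            have := PySem.Dict.contains_eq_isSome_get? d' ((k : Int) + 4)
            rw [h] at this; simp [this] at hc
        have hnone : d.get? ((k : Int) + 4) = none := by
          rcases h : d.get? ((k : Int) + 4) with _ | v
          · rfl
          · exact absurd (hE.1 _ _ h) (by simp [hnone'])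
        have e1 : ((k : Int) + 4) - 1 = ((k + 3 : Nat) : Int) := by push_cast; ring
        have e2 : ((k : Int) + 4) - 3 = ((k + 1 : Nat) : Int) := by push_cast; ring
        have e3 : ((k : Int) + 4) - 4 = ((k : Nat) : Int) := by ring
        simp only [if_true]
        rw [e1, e2, e3]
        obtain ⟨h1v, h1E⟩ := ih (k + 3) d d' hE (by omega)
        obtain ⟨h2v, h2E⟩ := ih (k + 1) d (nfA fuel ((k + 3 : Nat) : Int) d').2 h1E (by omega)
        obtain ⟨h3v, h3E⟩ := ih k d (nfA fuel ((k + 1 : Nat) : Int) (nfA fuel ((k + 3 : Nat) : Int) d').2).2 h2E (by omega)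
        set r1 := nfA fuel ((k + 3 : Nat) : Int) d' with hr1
        set r2 := nfA fuel ((k + 1 : Nat) : Int) r1.2 with hr2
        set r3 := nfA fuel ((k : Nat) : Int) r2.2 with hr3
        have hsum : r1.1 + r2.1 + r3.1 = pf d (k + 4) := by
          rw [h1v, h2v, h3v]
          simp only [pf, hnone]
        constructor
        · rw [PySem.Dict.getD_insert_self, hsum]
        · constructor
          · intro k' v hk'
            have hk'3 : r3.2.get? k' = some v := h3E.1 _ _ hk'
            have hkne : k' ≠ (k : Int) + 4 := by
              intro h; rw [h] at hk'; simp [hnone] at hk'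
            rw [PySem.Dict.get?_insert_of_ne _ _ hkne]; exact hk'3
          · intro k' v hk'
            by_cases hkk : k' = (k : Int) + 4
            · subst hkk
              rw [PySem.Dict.get?_insert_self] at hk'
              right
              refine ⟨by omega, ?_⟩
              have hv : v = r1.1 + r2.1 + r3.1 := by injection hk'.symm
              have htn : ((k : Int) + 4).toNat = k + 4 := by omega
              rw [hv, hsum, htn]
            · rw [PySem.Dict.get?_insert_of_ne _ _ hkk] at hk'
              exact h3E.2 _ _ hk'
      · -- cached
        have hc : d'.contains ((k : Int) + 4) = true := hcb
        simp only [Bool.true_eq_false, if_false]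
        have hsome : (d'.get? ((k : Int) + 4)).isSome := by
          rw [← PySem.Dict.contains_eq_isSome_get?]; exact hc
        rcases h : d'.get? ((k : Int) + 4) with _ | v
        · rw [h] at hsome; simp at hsome
        · refine ⟨?_, hE⟩
          rw [PySem.Dict.getD_eq_get?_getD, h, Option.getD_some]
          rcases hE.2 _ _ h with hin | ⟨_, hval⟩
          · simp only [pf, hin]
          · rw [hval]; congr 1

-- B-side invariant: after processing 4..m, keys in [4,m] hold pf, the rest is untouched
def InvB (d D : PySem.Dict Int Int) (m : Int) : Prop :=
  ∀ j : Int, D.get? j = if 4 ≤ j ∧ j ≤ m then some (pf d j.toNat) else d.get? j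

theorem nfGet_pf (d D : PySem.Dict Int Int) (m : Int) (hI : InvB d D m)
    (k : Int) (h0 : 0 ≤ k) (hm : k ≤ m ∨ k ≤ 3) :
    nfGet D k = pf d k.toNat := by
  unfold nfGet
  by_cases h3 : k ≤ 3
  · rw [if_pos h3]
    interval_cases k <;> simp [pf]
  · have hk4 : 4 ≤ k := by omega
    have hkm : k ≤ m := by rcases hm with h | h <;> omega
    rw [if_neg h3, PySem.Dict.getD_eq_get?_getD, hI k, if_pos ⟨hk4, hkm⟩, Option.getD_some]

theorem invB_step (d D : PySem.Dict Int Int) (m : Int) (hm : 3 ≤ m)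
    (hI : InvB d D m) : InvB d (nfStep D (m + 1)) (m + 1) := by
  have hDm1 : D.get? (m + 1) = d.get? (m + 1) := by
    rw [hI (m + 1), if_neg (by omega : ¬(4 ≤ m + 1 ∧ m + 1 ≤ m))]
  unfold nfStep
  rcases hcb : D.contains (m + 1) with _ | _
  · -- absent: insert pf d (m+1)
    have hnone : D.get? (m + 1) = none := by
      rcases h : D.get? (m + 1) with _ | v
      · rfl
      · exfalso
        have := PySem.Dict.contains_eq_isSome_get? D (m + 1)
        rw [h] at this; simp [this] at hcb
    have hdnone : d.get? (m + 1) = none := by rw [← hDm1]; exact hnone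
    simp only [Bool.false_eq_true, if_false]
    have g1 := nfGet_pf d D m hI (m + 1 - 1) (by omega) (by omega)
    have g2 := nfGet_pf d D m hI (m + 1 - 3) (by omega) (by omega)
    have g3 := nfGet_pf d D m hI (m + 1 - 4) (by omega) (by omega)
    obtain ⟨t, ht⟩ : ∃ t : Nat, m + 1 = ((t : Int)) + 4 := ⟨(m - 3).toNat, by omega⟩
    have hsum : nfGet D (m + 1 - 1) + nfGet D (m + 1 - 3) + nfGet D (m + 1 - 4)
        = pf d (m + 1).toNat := by
      rw [g1, g2, g3]
      have e0 : (m + 1).toNat = t + 4 := by omega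
      have e1 : (m + 1 - 1).toNat = t + 3 := by omega
      have e2 : (m + 1 - 3).toNat = t + 1 := by omega
      have e3 : (m + 1 - 4).toNat = t := by omega
      rw [e0, e1, e2, e3]
      have : d.get? ((t : Int) + 4) = none := by rw [← ht]; exact hdnone
      simp only [pf, this]
    intro j
    by_cases hj : j = m + 1
    · subst hj
      rw [PySem.Dict.get?_insert_self, hsum]
      simp only [if_pos (by omega : 4 ≤ m + 1 ∧ m + 1 ≤ m + 1)]
    · rw [PySem.Dict.get?_insert_of_ne _ _ hj, hI j]
      by_cases hjr : 4 ≤ j ∧ j ≤ m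
      · rw [if_pos hjr, if_pos (by omega : 4 ≤ j ∧ j ≤ m + 1)]
      · have : ¬(4 ≤ j ∧ j ≤ m + 1) := by omega
        rw [if_neg hjr, if_neg this]
  · -- already cached: pf d (m+1) is the cached value
    simp only [if_true]
    have hsome : (D.get? (m + 1)).isSome := by
      rw [← PySem.Dict.contains_eq_isSome_get?]; exact hcb
    rcases h : d.get? (m + 1) with _ | v
    · exfalso; rw [hDm1, h] at hsome; simp at hsome
    intro j
    by_cases hj : j = m + 1
    · subst hj
      rw [hDm1, h]
      simp only [if_pos (by omega : 4 ≤ m + 1 ∧ m + 1 ≤ m + 1)]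
      obtain ⟨t, ht⟩ : ∃ t : Nat, m + 1 = ((t : Int)) + 4 := ⟨(m - 3).toNat, by omega⟩
      have e0 : (m + 1).toNat = t + 4 := by omega
      rw [e0]
      have hv : d.get? ((t : Int) + 4) = some v := by rw [← ht]; exact h
      simp only [pf, hv]
    · rw [hI j]
      by_cases hjr : 4 ≤ j ∧ j ≤ m
      · rw [if_pos hjr, if_pos (by omega : 4 ≤ j ∧ j ≤ m + 1)]
      · have : ¬(4 ≤ j ∧ j ≤ m + 1) := by omega
        rw [if_neg hjr, if_neg this]

theorem foldB_inv (d : PySem.Dict Int Int) : ∀ k : Nat,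
    InvB d ((PySem.List.pyRange 4 (((k : Int) + 4) + 1) 1).foldl nfStep d) ((k : Int) + 4) := by
  intro k
  induction k with
  | zero =>
    rw [show (((0 : Nat) : Int) + 4) + 1 = 4 + 1 by norm_num,
        PySem.List.pyRange_one_singleton]
    simp only [List.foldl_cons, List.foldl_nil]
    have hbase : InvB d d 3 := by
      intro j; rw [if_neg (by omega)]
    have := invB_step d d 3 (by omega) hbase
    simpa using this
  | succ k ih =>
    rw [show (((k + 1 : Nat) : Int) + 4) + 1 = ((((k : Int) + 4) + 1)) + 1 by push_cast; ring,
        PySem.List.pyRange_one_succ_right (by omega : (4 : Int) ≤ ((k : Int) + 4) + 1),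
        List.foldl_append]
    simp only [List.foldl_cons, List.foldl_nil]
    have := invB_step d _ (((k : Int) + 4)) (by omega) ih
    simpa [show ((k + 1 : Nat) : Int) + 4 = (((k : Int) + 4)) + 1 by push_cast; ring] using this

theorem number_factor_topDown_spec' (n : Int) (temp_dict : List (Int × Int))
    (hpre : Pre_number_factor_topDown n temp_dict) :
    number_factor_topDown n temp_dict = number_factor_topDown_alt n temp_dict := by
  unfold number_factor_topDown number_factor_topDown_alt
  set d := PySem.Dict.ofList temp_dict with hd
  by_cases hsmall : 0 ≤ n ∧ n ≤ 3
  · -- base cases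
    simp only [hsmall]
    obtain ⟨h0, h3⟩ := hsmall
    interval_cases n <;> simp [nfA]
  · simp only [hsmall, if_false]
    by_cases hneg : n < 0
    · -- n < 0: cached by Pre_; both sides read the cached value
      have hc : d.contains n = true := by
        rcases hpre with h | h
        · omega
        · exact h
      rw [PySem.List.pyRange_one_eq_nil (by omega : n + 1 ≤ 4)]
      simp only [List.foldl_nil]
      rw [show n.toNat + 1 = 1 by omega, nfA]
      simp only [if_neg (by omega : ¬(n = 0 ∨ n = 1 ∨ n = 2)), if_neg (by omega : ¬ n = 3),
        hc, Bool.true_eq_false, if_false]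
    · -- n ≥ 4
      have hn4 : 4 ≤ n := by omega
      obtain ⟨k, hk⟩ : ∃ k : Nat, n = ((k : Int)) + 4 := ⟨(n - 4).toNat, by omega⟩
      have hcast : ((k + 4 : Nat) : Int) = n := by push_cast; omega
      have hmA := nfA_main (n.toNat + 1) (k + 4) d d (pext_refl d) (by omega)
      rw [hcast] at hmA
      rw [hmA.1]
      have hI := foldB_inv d k
      rw [← hk] at hI
      rw [PySem.Dict.getD_eq_get?_getD, hI n, if_pos (by omega : 4 ≤ n ∧ n ≤ n),
        Option.getD_some]
      congr 1
      omega

-- ===== VERDICT (by name: the statement is the Claim_ definition above) =====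
theorem number_factor_topDown_spec : Claim_equal_number_factor_topDown := by
  intro n temp_dict _ hpre
  exact number_factor_topDown_spec' n temp_dict hpre
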